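-- pv_equiv track=rewrite | github.com/belongtothenight/foo.bar_challenge | 1.py | solution
-- ===== SOURCE A (Python) =====
-- def solution(s):
--     s_len = len(s)
--     def check(s):
--         for i in range(s_len//2):
--             cnt = 0
--             tmp = s[:i+1]
--             for j in range(i+1, s_len, i+1):
--                 tmp2 = s[j:j+len(tmp)]
--                 if tmp2 == tmp:
--                     cnt += 1
--                 else:
--                     break
--                 if j == s_len - (i+1):
--                     cnt += 1
--                     return cnt
--         return 1
--     # move string
--     for i in range(s_len):
--         ans = check(s)
--         if ans != 1:
--             return ans
--         s = s[1:] + s[0]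
--     return 1
-- ===== SOURCE B (Python) =====
-- def solution(s):
--     n = len(s)
--     for L in range(1, n // 2 + 1):
--         k = n // L
--         if s[:L] * k == s:
--             return k
--     return 1
-- ===== Notes on version B (the rewrite author's own statement) =====
-- stated objective: faster
-- what changed: B drops A's rotation loop entirely (the repeated-tiling count is rotation-invariant) and tests each candidate period L by one whole-string comparison s[:L]*(n//L) == s instead of A's chunk-by-chunk inner scan.
import Mathlib
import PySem

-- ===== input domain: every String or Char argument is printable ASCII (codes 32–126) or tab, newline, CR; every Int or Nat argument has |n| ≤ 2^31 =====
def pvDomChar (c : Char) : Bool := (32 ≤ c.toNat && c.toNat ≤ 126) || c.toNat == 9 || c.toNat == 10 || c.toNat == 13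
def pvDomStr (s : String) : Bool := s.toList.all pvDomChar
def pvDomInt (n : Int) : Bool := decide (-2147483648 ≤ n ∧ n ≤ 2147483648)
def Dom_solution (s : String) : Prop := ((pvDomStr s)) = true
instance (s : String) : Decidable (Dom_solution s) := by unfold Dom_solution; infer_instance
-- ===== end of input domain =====

-- B removes A's rotation loop (the tiling count is rotation-invariant) and tests each period by one
-- whole-string comparison; equivalence of return values is proved for all strings (A is total).

-- ===== PORT A =====
-- inner 'for j in range(i+1, s_len, i+1)' loop of check; L = i+1, tmp = s[:L];
-- returns some cnt where Python returns cnt, none where the loop breaks/ends.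
def pvInnerA (l : List Char) (n L : Nat) (js : List Nat) (cnt : Int) : Option Int :=
  match js with
  | [] => none
  | j :: rest =>
    let tmp := l.take L                      -- tmp = s[:i+1]
    let tmp2 := (l.drop j).take L            -- tmp2 = s[j:j+len(tmp)]  (j ≥ 0: exact)
    if tmp2 = tmp then
      let c := cnt + 1
      if j = n - L then some (c + 1) else pvInnerA l n L rest c
    else none

-- outer 'for i in range(s_len//2)' loop of check; range(L, n, L) has (n-1)/L elements
def pvCheckGoA (l : List Char) (n : Nat) (is_ : List Nat) : Int :=
  match is_ with
  | [] => 1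
  | i :: rest =>
    match pvInnerA l n (i+1) (List.range' (i+1) ((n-1)/(i+1)) (i+1)) 0 with
    | some c => c
    | none => pvCheckGoA l n rest

def pvCheckA (l : List Char) (n : Nat) : Int :=
  pvCheckGoA l n (List.range (n/2))

-- 'for i in range(s_len): ans = check(s); if ans != 1: return ans; s = s[1:] + s[0]'
-- (s[0] only evaluated when s is nonempty; drop 1 ++ take 1 is exactly s[1:] + s[0] there)
def pvRotLoopA (l : List Char) (n : Nat) (fuel : List Nat) : Int :=
  match fuel with
  | [] => 1
  | _ :: rest =>
    let ans := pvCheckA l n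
    if ans ≠ 1 then ans else pvRotLoopA (l.drop 1 ++ l.take 1) n rest

def solution (s : String) : Int :=
  pvRotLoopA s.toList s.toList.length (List.range s.toList.length)

-- ===== PORT B =====
-- 'for L in range(1, n//2+1): k = n//L; if s[:L]*k == s: return k' / 'return 1'
def pvAltGo (l : List Char) (n : Nat) (Ls : List Nat) : Int :=
  match Ls with
  | [] => 1
  | L :: rest =>
    let k := n / L
    if (List.replicate k (l.take L)).flatten = l then (k : Int) else pvAltGo l n rest

def solution_alt (s : String) : Int :=
  pvAltGo s.toList s.toList.length (List.range' 1 (s.toList.length / 2))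

-- ===== PRECONDITION & SPEC =====
def Spec_solution (s : String) (out : Int) : Prop := out = solution_alt s
instance (s : String) (out : Int) : Decidable (Spec_solution s out) := by unfold Spec_solution; infer_instance

-- ===== CLAIM (what is proved, stated in full; the proofs are below) =====
def Claim_equal_solution : Prop := ∀ (s : String), Dom_solution s → Spec_solution s (solution s)

-- ===== LEMMAS AND PROOFS =====

-- abbreviation used throughout: "L tiles l"
def pvTile (l : List Char) (L : Nat) : Prop :=
  (List.replicate (l.length / L) (l.take L)).flatten = l

lemma flatten_replicate_length (k : Nat) (p : List Char) :
    (List.replicate k p).flatten.length = k * p.length := by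
  induction k with
  | zero => simp
  | succ k ih => simp [List.replicate_succ, ih, Nat.succ_mul, Nat.add_comm]

lemma tile_dvd {l : List Char} {L : Nat} (hLn : L ≤ l.length)
    (h : pvTile l L) : L ∣ l.length := by
  have h2 := congrArg List.length h
  rw [flatten_replicate_length] at h2
  have hlen : (l.take L).length = L := by simp [Nat.min_eq_left hLn]
  rw [hlen] at h2
  exact ⟨l.length / L, by rw [Nat.mul_comm]; exact h2.symm⟩

-- chunk extraction from a tiling
lemma tile_drop {l : List Char} {L : Nat} (hLn : L ≤ l.length) (h : pvTile l L) :
    ∀ t, l.drop (t * L) = (List.replicate (l.length / L - t) (l.take L)).flatten := by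
  intro t
  induction t with
  | zero => simpa using h.symm
  | succ t ih =>
    have hp : (l.take L).length = L := by simp [Nat.min_eq_left hLn]
    rw [show (t+1)*L = t*L + L from by ring, ← List.drop_drop, ih]
    rcases e : l.length / L - t with _ | m
    · have e2 : l.length / L - (t+1) = 0 := by omega
      simp [e2]
    · have e2 : l.length / L - (t+1) = m := by omega
      rw [e2, List.replicate_succ, List.flatten_cons]
      exact List.drop_left' hp

lemma tile_chunk {l : List Char} {L : Nat} (hLn : L ≤ l.length) (h : pvTile l L) :
    ∀ t, t < l.length / L → (l.drop (t * L)).take L = l.take L := by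
  intro t ht
  have hp : (l.take L).length = L := by simp [Nat.min_eq_left hLn]
  rw [tile_drop hLn h t]
  obtain ⟨m, e⟩ : ∃ m, l.length / L - t = m + 1 := ⟨l.length / L - t - 1, by omega⟩
  rw [e, List.replicate_succ, List.flatten_cons]
  exact List.take_left' hp

-- reconstruction: matching chunks make a tiling
lemma tile_recon {L : Nat} :
    ∀ (k : Nat) (l : List Char), l.length = k * L →
      (∀ t, t < k → (l.drop (t * L)).take L = l.take L) →
      l = (List.replicate k (l.take L)).flatten := by
  intro k
  induction k with
  | zero =>
    intro l hlen _
    simp [List.length_eq_zero_iff.mp (by simpa using hlen)]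
  | succ k ih =>
    intro l hlen hch
    have hLle : L ≤ l.length := by rw [hlen, Nat.succ_mul]; omega
    have hdl : (l.drop L).length = k * L := by
      rw [List.length_drop, hlen, Nat.succ_mul]; omega
    by_cases hk : k = 0
    · subst hk
      have hlen' : l.length = L := by simpa using hlen
      simp [List.take_of_length_le (le_of_eq hlen')]
    · have hch' : ∀ t, t < k → ((l.drop L).drop (t*L)).take L = (l.drop L).take L := by
        intro t ht
        rw [List.drop_drop, show L + t*L = (t+1)*L from by ring, hch (t+1) (by omega)]
        have h1 := hch 1 (by omega)
        simpa using h1.symm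
      have hrec := ih (l.drop L) hdl hch'
      have hq : (l.drop L).take L = l.take L := by simpa using hch 1 (by omega)
      rw [hq] at hrec
      conv_lhs => rw [← List.take_append_drop L l]
      rw [List.replicate_succ, List.flatten_cons, ← hrec]

-- inner loop: skipping matched chunks
lemma pvInnerA_pass (l : List Char) (n L : Nat) :
    ∀ (js₁ js₂ : List Nat) (c : Int),
      (∀ j ∈ js₁, (l.drop j).take L = l.take L ∧ j ≠ n - L) →
      pvInnerA l n L (js₁ ++ js₂) c = pvInnerA l n L js₂ (c + js₁.length) := by
  intro js₁
  induction js₁ with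
  | nil => intro js₂ c _; simp
  | cons j t ih =>
    intro js₂ c h
    have hj := h j (by simp)
    simp only [List.cons_append, pvInnerA]
    rw [if_pos hj.1, if_neg hj.2, ih js₂ (c+1) (fun x hx => h x (by simp [hx]))]
    congr 1
    rw [List.length_cons]
    push_cast
    ring

lemma pvInnerA_none (l : List Char) (n L : Nat) :
    ∀ (js : List Nat) (c : Int), (∀ j ∈ js, j ≠ n - L) → pvInnerA l n L js c = none := by
  intro js
  induction js with
  | nil => intro c _; rfl
  | cons j t ih =>
    intro c h
    simp only [pvInnerA]
    by_cases hc : (l.drop j).take L = l.take L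
    · rw [if_pos hc, if_neg (h j (by simp))]
      exact ih _ (fun x hx => h x (by simp [hx]))
    · rw [if_neg hc]

-- the inner loop computes exactly the tiling test
lemma pvInnerA_eq (l : List Char) (L : Nat) (hL : 1 ≤ L) (hLn : L ≤ l.length / 2) :
    pvInnerA l l.length L (List.range' L ((l.length - 1)/L) L) 0 =
      (if (List.replicate (l.length / L) (l.take L)).flatten = l
        then some ((l.length / L : Nat) : Int) else none) := by
  have hLlen : L ≤ l.length := le_trans hLn (Nat.div_le_self _ _)
  have h2L : 2 * L ≤ l.length := by
    have := Nat.div_mul_le_self l.length 2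
    omega
  by_cases hdvd : L ∣ l.length
  · have hkL : l.length = l.length / L * L := (Nat.div_mul_cancel hdvd).symm
    have hk2 : 2 ≤ l.length / L := (Nat.le_div_iff_mul_le (by omega)).mpr h2L
    have e4 : L * (l.length / L) = l.length := Nat.mul_div_cancel' hdvd
    have hrange : (l.length - 1) / L = l.length / L - 1 := by
      have e5 : L * (l.length / L - 1) = L * (l.length / L) - L := by
        rw [Nat.mul_sub, Nat.mul_one]
      rw [show l.length - 1 = L * (l.length / L - 1) + (L - 1) from by omega]
      rw [Nat.mul_add_div (by omega), Nat.div_eq_of_lt (show L - 1 < L from by omega)]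
      omega
    have e6 : (l.length / L - 1) * L = l.length - L := by
      rw [Nat.sub_mul, one_mul, ← hkL]
    have e7 : L * (l.length / L - 2) = l.length - 2 * L := by
      rw [Nat.mul_sub, e4]
      omega
    by_cases htile : (List.replicate (l.length / L) (l.take L)).flatten = l
    · rw [if_pos htile, hrange]
      have hdecomp : List.range' L (l.length / L - 1) L
          = List.range' L (l.length / L - 2) L ++ [L + L * (l.length / L - 2)] := by
        rw [← List.range'_concat]
        congr 1
        omega
      rw [hdecomp]
      rw [pvInnerA_pass l l.length L _ _ 0 ?pref]
      case pref =>
        intro j hj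
        rw [List.mem_range'] at hj
        obtain ⟨i, hi, rfl⟩ := hj
        refine ⟨by simpa [show L + L * i = (i+1) * L from by ring] using
            tile_chunk hLlen htile (i+1) (by omega), ?_⟩
        intro hcontra
        have e3 : L * (i + 3) = L + L * i + L + L := by ring
        have h2 : L * (i + 3) ≤ L * (l.length / L) := Nat.mul_le_mul_left L (by omega)
        omega
      · simp only [pvInnerA]
        have hlast : L + L * (l.length / L - 2) = (l.length / L - 1) * L := by omega
        rw [if_pos (by
          rw [hlast]
          exact tile_chunk hLlen htile _ (by omega))]
        rw [if_pos (by rw [hlast]; omega)]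
        rw [List.length_range']
        congr 1
        push_cast [Nat.cast_sub hk2]
        omega
    · rw [if_neg htile]
      have hex : ∃ t, t < l.length / L ∧ ¬ (l.drop (t*L)).take L = l.take L := by
        by_contra hno
        push Not at hno
        exact htile (tile_recon (l.length / L) l hkL hno).symm
      classical
      have ht0k : Nat.find hex < l.length / L := (Nat.find_spec hex).1
      have ht0bad : ¬ (l.drop (Nat.find hex * L)).take L = l.take L := (Nat.find_spec hex).2
      have ht0min : ∀ t, t < Nat.find hex → (l.drop (t*L)).take L = l.take L := by
        intro t ht
        by_contra hb
        exact Nat.find_min hex ht ⟨by omega, hb⟩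
      have ht01 : 1 ≤ Nat.find hex := by
        by_contra hb
        have h0 : Nat.find hex = 0 := by omega
        rw [h0] at ht0bad
        simp at ht0bad
      rw [hrange]
      have hdecomp : List.range' L (l.length / L - 1) L
          = List.range' L (Nat.find hex - 1) L ++ List.range' (L + L * (Nat.find hex - 1)) (l.length / L - 1 - (Nat.find hex - 1)) L := by
        rw [List.range'_append]
        congr 1
        omega
      rw [hdecomp]
      rw [pvInnerA_pass l l.length L _ _ 0 ?pref2]
      case pref2 =>
        intro j hj
        rw [List.mem_range'] at hj
        obtain ⟨i, hi, rfl⟩ := hj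
        refine ⟨by simpa [show L + L * i = (i+1) * L from by ring] using ht0min (i+1) (by omega), ?_⟩
        intro hcontra
        have e3 : L * (i + 3) = L + L * i + L + L := by ring
        have h2 : L * (i + 3) ≤ L * (l.length / L) := Nat.mul_le_mul_left L (by omega)
        omega
      · have hne : l.length / L - 1 - (Nat.find hex - 1) = (l.length / L - 1 - (Nat.find hex - 1) - 1) + 1 := by omega
        rw [hne, List.range'_succ]
        simp only [pvInnerA]
        have e8 : L * (Nat.find hex - 1) = L * Nat.find hex - L := by
          rw [Nat.mul_sub, Nat.mul_one]
        have e10 : L * 1 ≤ L * Nat.find hex := Nat.mul_le_mul_left L ht01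
        have e9 : L + L * (Nat.find hex - 1) = Nat.find hex * L := by
          have ec : Nat.find hex * L = L * Nat.find hex := Nat.mul_comm _ _
          omega
        rw [if_neg (by rw [e9]; exact ht0bad)]
  · rw [if_neg (by
      intro htile
      exact hdvd (tile_dvd hLlen htile))]
    apply pvInnerA_none
    intro j hj
    rw [List.mem_range'] at hj
    obtain ⟨i, hi, rfl⟩ := hj
    intro hcontra
    have hLlen2 : L ≤ l.length := hLlen
    have e3 : L * (i + 2) = L + L * i + L := by ring
    have : l.length = L * (i + 2) := by omega
    exact hdvd ⟨i + 2, this⟩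

lemma pvCheckGoA_eq_altGo (l : List Char) :
    ∀ (ts : List Nat), (∀ i ∈ ts, i + 1 ≤ l.length / 2) →
      pvCheckGoA l l.length ts = pvAltGo l l.length (ts.map (· + 1)) := by
  intro ts
  induction ts with
  | nil => intro _; rfl
  | cons i t ih =>
    intro hb
    have h2 : i + 1 ≤ l.length / 2 := hb i (by simp)
    simp only [pvCheckGoA, List.map_cons, pvAltGo]
    rw [pvInnerA_eq l (i+1) (by omega) h2]
    by_cases htile : (List.replicate (l.length / (i+1)) (l.take (i+1))).flatten = l
    · rw [if_pos htile, if_pos htile]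
    · rw [if_neg htile, if_neg htile]
      exact ih (fun x hx => hb x (by simp [hx]))

lemma pvCheckA_eq_alt (l : List Char) :
    pvCheckA l l.length = pvAltGo l l.length (List.range' 1 (l.length / 2)) := by
  unfold pvCheckA
  rw [pvCheckGoA_eq_altGo l (List.range (l.length / 2))
      (fun i hi => by have := List.mem_range.mp hi; omega)]
  congr 1
  rw [List.range'_eq_map_range]
  apply List.map_congr_left
  intro a _
  omega

lemma flatten_rep_comm (m : Nat) (p : List Char) :
    (List.replicate m p).flatten ++ p = p ++ (List.replicate m p).flatten := by
  induction m with
  | zero => simp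
  | succ m ih => simp [List.replicate_succ, List.append_assoc, ih]

-- rotation invariance of tiling
lemma tile_iff_rotate {l : List Char} {L : Nat} (hL : 1 ≤ L) (hLn : L ≤ l.length / 2) :
    pvTile l L ↔ (L ∣ l.length ∧ l.rotate L = l) := by
  have hLlen : L ≤ l.length := le_trans hLn (Nat.div_le_self _ _)
  have h2L : 2 * L ≤ l.length := by
    have := Nat.div_mul_le_self l.length 2
    omega
  constructor
  · intro h
    have hd := tile_dvd hLlen h
    have hk2 : 2 ≤ l.length / L := by
      rw [Nat.le_div_iff_mul_le (by omega)]
      omega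
    refine ⟨hd, ?_⟩
    rw [List.rotate_eq_drop_append_take hLlen]
    have h1 := tile_drop hLlen h 1
    rw [one_mul] at h1
    rw [h1, flatten_rep_comm, ← List.flatten_cons, ← List.replicate_succ,
        show l.length / L - 1 + 1 = l.length / L from by omega]
    exact h
  · rintro ⟨hd, hrot⟩
    rw [List.rotate_eq_drop_append_take hLlen] at hrot
    have hkL : l.length = l.length / L * L := (Nat.div_mul_cancel hd).symm
    have hpre : l.drop L = l.take (l.length - L) := by
      have h := List.take_left' (l₁ := l.drop L) (l₂ := l.take L) (List.length_drop ..)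
      rw [hrot] at h
      exact h.symm
    have hchunks : ∀ t, t < l.length / L → (l.drop (t*L)).take L = l.take L := by
      intro t
      induction t with
      | zero => intro _; simp
      | succ t iht =>
        intro ht
        have hm : (t+2)*L ≤ l.length := by
          rw [hkL]
          exact Nat.mul_le_mul_right L (by omega)
        rw [show (t+2)*L = t*L+L+L from by ring] at hm
        rw [show (t+1)*L = L + t*L from by ring, ← List.drop_drop, hpre,
            List.drop_take, List.take_take,
            show min L (l.length - L - t*L) = L from by omega]
        exact iht (by omega)
    have := tile_recon (l.length / L) l hkL hchunks
    exact this.symm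

lemma tile_rot1 {l : List Char} {L : Nat} (hL : 1 ≤ L) (hLn : L ≤ l.length / 2) :
    pvTile (l.drop 1 ++ l.take 1) L ↔ pvTile l L := by
  rcases Nat.eq_zero_or_pos l.length with h0 | hpos
  · rw [List.length_eq_zero_iff.mp h0]
    simp
  · have hrlen : (l.drop 1 ++ l.take 1).length = l.length := by simp; omega
    have hr1 : l.drop 1 ++ l.take 1 = l.rotate 1 :=
      (List.rotate_eq_drop_append_take (by omega)).symm
    rw [tile_iff_rotate hL (by rw [hrlen]; exact hLn), tile_iff_rotate hL hLn, hrlen, hr1]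
    have key : (l.rotate 1).rotate L = l.rotate 1 ↔ l.rotate L = l := by
      constructor
      · intro h
        have h2 := congrArg (fun x => List.rotate x (l.length - 1)) h
        simp only [List.rotate_rotate] at h2
        rw [show 1 + L + (l.length - 1) = l.length + L from by omega,
            show 1 + (l.length - 1) = l.length from by omega,
            ← List.rotate_rotate, List.rotate_length] at h2
        exact h2
      · intro h
        rw [List.rotate_rotate, Nat.add_comm, ← List.rotate_rotate, h]
    exact and_congr_right (fun _ => key)

lemma pvAltGo_rot1 (l : List Char) :
    ∀ (Ls : List Nat), (∀ L ∈ Ls, 1 ≤ L ∧ L ≤ l.length / 2) →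
      pvAltGo (l.drop 1 ++ l.take 1) l.length Ls = pvAltGo l l.length Ls := by
  intro Ls
  induction Ls with
  | nil => intro _; rfl
  | cons L t ih =>
    intro hb
    obtain ⟨hL1, hL2⟩ := hb L (by simp)
    have hrlen : (l.drop 1 ++ l.take 1).length = l.length := by simp; omega
    have ht := tile_rot1 (l := l) (L := L) hL1 hL2
    simp only [pvAltGo]
    by_cases hc : pvTile l L
    · have hc' := ht.mpr hc
      unfold pvTile at hc hc'
      rw [hrlen] at hc'
      rw [if_pos hc', if_pos hc]
    · have hc' : ¬ pvTile (l.drop 1 ++ l.take 1) L := fun x => hc (ht.mp x)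
      unfold pvTile at hc hc'
      rw [hrlen] at hc'
      rw [if_neg hc', if_neg hc]
      exact ih (fun x hx => hb x (by simp [hx]))

lemma pvRotLoopA_eq (n : Nat) :
    ∀ (fuel : List Nat) (l : List Char), l.length = n →
      pvRotLoopA l n fuel =
        (if fuel.isEmpty then 1 else pvAltGo l n (List.range' 1 (n / 2))) := by
  intro fuel
  induction fuel with
  | nil => intro l h; rfl
  | cons f t ih =>
    intro l h
    subst h
    have hc := pvCheckA_eq_alt l
    simp only [pvRotLoopA, List.isEmpty_cons]
    by_cases ha : pvCheckA l l.length = 1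
    · rw [if_neg (by simp [ha])]
      rw [ih (l.drop 1 ++ l.take 1) (by simp; omega)]
      have hr := pvAltGo_rot1 l (List.range' 1 (l.length / 2)) (fun L hL => by
        rw [List.mem_range'] at hL
        obtain ⟨i, hi, rfl⟩ := hL
        omega)
      rw [hr, ← hc, ha]
      simp
    · rw [if_pos ha]
      simpa using hc

-- ===== VERDICT (by name: the statement is the Claim_ definition above) =====
theorem solution_spec : Claim_equal_solution := by
  intro s _
  unfold Spec_solution solution solution_alt
  rw [pvRotLoopA_eq s.toList.length (List.range s.toList.length) s.toList rfl]
  rcases Nat.eq_zero_or_pos s.toList.length with h0 | hpos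
  · rw [h0]
    rfl
  · rw [if_neg (by
      simp only [List.isEmpty_iff, List.range_eq_nil]
      omega)]
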